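-- pv_equiv track=rewrite | github.com/ffwatcharin/Object-Oriented-Data-Structures | Chapter_Linked List/linked_5.py | get_num_at
-- ===== SOURCE A (Python) =====
-- def get_num_at(digit, num):
--     num = abs(num)
--     i = 0
--     res = -1
--     while i < digit:
--         res = num % 10
--         num = num//10
--         i += 1
--     return res
-- ===== SOURCE B (Python) =====
-- def get_num_at(digit, num):
--     if digit <= 0:
--         return -1
--     return (abs(num) // 10 ** (digit - 1)) % 10
-- ===== Notes on version B (the rewrite author's own statement) =====
-- stated objective: simpler
-- what changed: Replaced the digit-peeling while loop with a guard for non-positive positions and a closed-form (abs(num) // 10**(digit-1)) % 10 extraction.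
import Mathlib
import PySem

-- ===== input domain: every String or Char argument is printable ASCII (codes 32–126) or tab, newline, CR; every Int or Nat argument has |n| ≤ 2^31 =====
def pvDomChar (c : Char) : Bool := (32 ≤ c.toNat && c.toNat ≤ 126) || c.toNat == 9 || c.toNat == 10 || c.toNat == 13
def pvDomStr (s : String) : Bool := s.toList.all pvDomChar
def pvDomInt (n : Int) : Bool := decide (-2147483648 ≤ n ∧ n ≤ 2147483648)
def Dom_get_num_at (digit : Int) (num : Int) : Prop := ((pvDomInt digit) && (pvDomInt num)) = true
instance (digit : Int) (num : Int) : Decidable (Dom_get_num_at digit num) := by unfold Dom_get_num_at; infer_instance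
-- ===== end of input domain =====

-- B replaces A's digit-peeling while loop by a guard and a closed-form div/mod extraction (simpler).

-- ===== PORT A =====
-- while i < digit runs (digit - 0) times; fuel = digit.toNat (0 if digit ≤ 0, as in Python)
def pvLoopA : Nat → Int → Int → Int
  | 0, _, res => res
  | n + 1, num, _ => pvLoopA n (PySem.Int.floordiv num 10) (PySem.Int.mod num 10)

def get_num_at (digit : Int) (num : Int) : Int :=
  pvLoopA digit.toNat |num| (-1)

-- ===== PORT B =====
def get_num_at_alt (digit : Int) (num : Int) : Int :=
  if digit ≤ 0 then -1
  else PySem.Int.mod (PySem.Int.floordiv |num| ((10 : Int) ^ (digit - 1).toNat)) 10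

-- ===== PRECONDITION & SPEC =====
def Spec_get_num_at (digit : Int) (num : Int) (out : Int) : Prop := out = get_num_at_alt digit num
instance (digit : Int) (num : Int) (out : Int) : Decidable (Spec_get_num_at digit num out) := by unfold Spec_get_num_at; infer_instance

-- ===== CLAIM (what is proved, stated in full; the proofs are below) =====
def Claim_equal_get_num_at : Prop := ∀ (digit : Int) (num : Int), Dom_get_num_at digit num → Spec_get_num_at digit num (get_num_at digit num)

-- ===== LEMMAS AND PROOFS =====
theorem pvLoopA_eq (n : Nat) (num res : Int) (h : 0 ≤ num) :
    pvLoopA (n + 1) num res = PySem.Int.mod (PySem.Int.floordiv num ((10 : Int) ^ n)) 10 := by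
  induction n generalizing num res with
  | zero =>
      show PySem.Int.mod num 10 = _
      rw [PySem.Int.floordiv_eq_ediv_of_pos (by omega : (0:Int) < 10 ^ 0)]
      simp
  | succ n ih =>
      have h10 : (0:Int) ≤ PySem.Int.floordiv num 10 := by
        rw [PySem.Int.floordiv_eq_ediv_of_pos (by omega : (0:Int) < 10)]
        exact Int.ediv_nonneg h (by omega)
      show pvLoopA (n + 1) (PySem.Int.floordiv num 10) (PySem.Int.mod num 10) = _
      rw [ih _ (PySem.Int.mod num 10) h10]
      congr 1
      rw [PySem.Int.floordiv_eq_ediv_of_pos (by omega : (0:Int) < 10),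
          PySem.Int.floordiv_eq_ediv_of_pos (by positivity : (0:Int) < 10 ^ n),
          PySem.Int.floordiv_eq_ediv_of_pos (by positivity : (0:Int) < 10 ^ (n+1)),
          Int.ediv_ediv_of_nonneg (by omega)]
      ring_nf

-- ===== VERDICT (by name: the statement is the Claim_ definition above) =====
theorem get_num_at_spec : Claim_equal_get_num_at := by
  unfold Claim_equal_get_num_at
  intro digit num _
  unfold Spec_get_num_at get_num_at get_num_at_alt
  by_cases hd : digit ≤ 0
  · have : digit.toNat = 0 := Int.toNat_of_nonpos hd
    simp [this, pvLoopA, hd]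
  · have h1 : 1 ≤ digit := by omega
    have : digit.toNat = (digit - 1).toNat + 1 := by omega
    rw [this, pvLoopA_eq _ _ _ (abs_nonneg num)]
    simp [hd]
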